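-- pv_equiv track=rewrite | github.com/ottoesp/logicgatediagramgenerator | diagramapp/diagramGenerator/autoArrange/verticalSpacing.py | space_around
-- ===== SOURCE A (Python) =====
-- def space_around(len_layer: int, max_len_layer: int) -> list[int]:
--     base = max_len_layer // (len_layer + 1)
--     extra = max_len_layer % (len_layer + 1)
--
--     positions = []
--     pos = base
--     for i in range(len_layer):
--         positions.append(pos)
--         pos += base + (1 if extra > 0 else 0)
--         extra -= 1
--
--     return positions
-- ===== SOURCE B (Python) =====
-- def space_around(len_layer: int, max_len_layer: int) -> list[int]:
--     base, extra = divmod(max_len_layer, len_layer + 1)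
--     return [base * (i + 1) + min(i, extra) for i in range(len_layer)]
-- ===== Notes on version B (the rewrite author's own statement) =====
-- stated objective: simpler
-- what changed: Replaced the accumulator loop (running pos, decrementing extra) with a closed-form per-index formula base*(i+1) + min(i, extra) in a single comprehension.
import Mathlib
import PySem

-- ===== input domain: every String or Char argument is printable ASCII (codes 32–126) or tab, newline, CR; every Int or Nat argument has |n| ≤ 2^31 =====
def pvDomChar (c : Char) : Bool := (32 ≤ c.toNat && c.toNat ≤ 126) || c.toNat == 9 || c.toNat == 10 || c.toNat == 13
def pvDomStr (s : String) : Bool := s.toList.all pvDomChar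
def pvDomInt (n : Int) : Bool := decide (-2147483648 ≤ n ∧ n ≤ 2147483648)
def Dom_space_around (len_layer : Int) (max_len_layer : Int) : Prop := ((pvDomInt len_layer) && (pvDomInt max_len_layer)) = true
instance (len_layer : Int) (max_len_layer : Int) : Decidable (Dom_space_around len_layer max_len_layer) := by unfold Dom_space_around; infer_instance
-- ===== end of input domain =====

-- B replaces A's accumulator loop by a closed-form per-index formula base*(i+1) + min(i, extra); objective: simpler.

-- ===== PORT A =====
def space_around (len_layer : Int) (max_len_layer : Int) : List Int :=
  let base := PySem.Int.floordiv max_len_layer (len_layer + 1)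
  let extra := PySem.Int.mod max_len_layer (len_layer + 1)
  let st := (PySem.List.pyRange 0 len_layer 1).foldl
    (fun (st : List Int × Int × Int) _ =>
      (st.1 ++ [st.2.1], st.2.1 + base + (if st.2.2 > 0 then 1 else 0), st.2.2 - 1))
    ([], base, extra)
  st.1

-- ===== PORT B =====
def space_around_alt (len_layer : Int) (max_len_layer : Int) : List Int :=
  let base := PySem.Int.floordiv max_len_layer (len_layer + 1)
  let extra := PySem.Int.mod max_len_layer (len_layer + 1)
  (PySem.List.pyRange 0 len_layer 1).map (fun i => base * (i + 1) + min i extra)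

-- ===== PRECONDITION & SPEC =====
-- Pre_ excludes only len_layer = -1, where Python A raises ZeroDivisionError.
def Pre_space_around (len_layer : Int) (max_len_layer : Int) : Prop := len_layer + 1 ≠ 0
instance (len_layer : Int) (max_len_layer : Int) : Decidable (Pre_space_around len_layer max_len_layer) := by unfold Pre_space_around; infer_instance
def pvWitness_space_around : Int × Int := (4, 23)

def Spec_space_around (len_layer : Int) (max_len_layer : Int) (out : List Int) : Prop := out = space_around_alt len_layer max_len_layer
instance (len_layer : Int) (max_len_layer : Int) (out : List Int) : Decidable (Spec_space_around len_layer max_len_layer out) := by unfold Spec_space_around; infer_instance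

-- ===== CLAIM (what is proved, stated in full; the proofs are below) =====
def Claim_equal_space_around : Prop := ∀ (len_layer : Int) (max_len_layer : Int), Dom_space_around len_layer max_len_layer → Pre_space_around len_layer max_len_layer → Spec_space_around len_layer max_len_layer (space_around len_layer max_len_layer)

-- ===== LEMMAS AND PROOFS =====

-- A's loop ignores the loop variable: characterise the fold over ANY list by its length.
theorem space_around_loop (base : Int) (l : List Int) : ∀ (acc : List Int) (pos e : Int),
    (l.foldl
      (fun (st : List Int × Int × Int) _ =>
        (st.1 ++ [st.2.1], st.2.1 + base + (if st.2.2 > 0 then 1 else 0), st.2.2 - 1))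
      (acc, pos, e)).1
    = acc ++ (List.range l.length).map
        (fun (j : Nat) => pos + base * (j : Int) + min (j : Int) (max e 0)) := by
  induction l with
  | nil => intro acc pos e; simp
  | cons a l ih =>
    intro acc pos e
    simp only [List.foldl_cons, List.length_cons]
    rw [ih]
    rw [List.range_succ_eq_map, List.map_cons, List.map_map]
    simp only [List.append_assoc, List.singleton_append]
    congr 2
    · push_cast; omega
    · apply List.map_congr_left
      intro j _
      simp only [Function.comp]
      push_cast
      rw [show base * ((j : Int) + 1) = base * (j : Int) + base from by ring]
      split_ifs with h <;> omega

-- ===== VERDICT (by name: the statement is the Claim_ definition above) =====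
theorem space_around_spec : Claim_equal_space_around := by
  intro len_layer max_len_layer _ hpre
  unfold Pre_space_around at hpre
  unfold Spec_space_around space_around space_around_alt
  by_cases hl : len_layer ≤ 0
  · rw [PySem.List.pyRange_one_eq_nil hl]
    simp
  · have hpos : (0 : Int) < len_layer + 1 := by omega
    rw [space_around_loop]
    rw [PySem.Int.mod_eq_emod_of_pos hpos]
    have hext : 0 ≤ max_len_layer % (len_layer + 1) := Int.emod_nonneg _ (by omega)
    rw [PySem.List.pyRange_one (0 : Int) len_layer, List.length_map, List.length_range,
        List.map_map]
    simp only [List.nil_append]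
    apply List.map_congr_left
    intro j _
    simp only [Function.comp, zero_add]
    have : max (max_len_layer % (len_layer + 1)) 0 = max_len_layer % (len_layer + 1) := by omega
    rw [this]
    ring
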